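-- pv_equiv track=rewrite | github.com/Leung-Hiufung/comp7505 | warmup/warmup.py | missing_odds
-- ===== SOURCE A (Python) =====
-- def missing_odds(inputs: list[int]) -> int:
--     """
--     @inputs@ is an unordered array of distinct integers.
--     If @a@ is the smallest number in the array and @b@ is the biggest,
--     return the sum of odd numbers in the interval [a, b] that are not present in @inputs@.
--     If there are no such numbers, return 0.
--
--     Limitations:
--         "It works":
--             @inputs@ may contain up to 10'000 elements.
--             Each element is in range 0 <= inputs[i] <= 10^4
--         "Exhaustive":
--             @inputs@ may contain up to 300'000 elements.
--             Each element is in range 0 <= inputs[i] <= 10^6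
--         "Welcome to COMP3506":
--             @inputs@ may contain up to 5'000'000 elements.
--             Each element is in range 0 <= inputs[i] <= 10^16
--
--     Examples:
--     missing_odds([1, 2]) == 0
--     missing_odds([1, 3]) == 0
--     missing_odds([1, 4]) == 3
--     missing_odds([4, 1]) == 3
--     missing_odds([4, 1, 8, 5]) == 10    # 3 and 7 are missing
--     """
--
--     # YOUR CODE GOES HERE
--     minimum = inputs[0]
--     maximum = inputs[0]
--     sum_odd_in_array = 0
--
--     # find max and min
--     for num in inputs:
--         if num < minimum:
--             # Get the max
--             minimum = num
--         if num > maximum: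
--             # Get the min
--             maximum = num
--         if num % 2 == 1:
--             # Add all odd numbers in array to `sum`
--             sum_odd_in_array += num
--
--     # Let interval collapse to "both sides are odd"
--     if maximum % 2 == 0:
--         maximum += 1
--         sum_odd_in_array += maximum
--     if minimum % 2 == 0:
--         minimum -= 1
--         sum_odd_in_array += minimum
--
--     # Case 1: No odd number in the interval
--     if maximum - minimum <= 2:
--         return 0
--
--     # Case 2: Add all odd numbers in the interval (inclusive)
--     sum_odd_sequence = (maximum**2 - minimum**2 + 2 * (minimum + maximum)) // 4
--     return sum_odd_sequence - sum_odd_in_array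
-- ===== SOURCE B (Python) =====
-- def missing_odds(inputs: list[int]) -> int:
--     """Sort the array, then sum the odd numbers falling in each gap
--     between consecutive sorted elements.
--
--     For one gap (a, b) the odds strictly between a and b sum to
--     g(b-1) - g(a), where g(n) = ((n+1)//2)**2 is the sum of all odd
--     numbers in [0, n]."""
--     def g(n):
--         return ((n + 1) // 2) ** 2
--     xs = sorted(inputs)
--     total = 0
--     for a, b in zip(xs, xs[1:]):
--         total += g(b - 1) - g(a)
--     return total
-- ===== Notes on version B (the rewrite author's own statement) =====
-- stated objective: alternative
-- what changed: Instead of one pass computing min/max/odd-sum plus endpoint parity fix-ups and a max-min<=2 early return, B sorts the array and sums, for each pair of consecutive sorted elements, the odd numbers lying strictly inside that gap via the prefix sum g(n)=((n+1)//2)**2.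
-- outside the precondition, e.g. on missing_odds([3, 3]): A returns 0, B returns -3; on missing_odds([1, 1, 2]): A returns 0, B returns -1
import Mathlib
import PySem

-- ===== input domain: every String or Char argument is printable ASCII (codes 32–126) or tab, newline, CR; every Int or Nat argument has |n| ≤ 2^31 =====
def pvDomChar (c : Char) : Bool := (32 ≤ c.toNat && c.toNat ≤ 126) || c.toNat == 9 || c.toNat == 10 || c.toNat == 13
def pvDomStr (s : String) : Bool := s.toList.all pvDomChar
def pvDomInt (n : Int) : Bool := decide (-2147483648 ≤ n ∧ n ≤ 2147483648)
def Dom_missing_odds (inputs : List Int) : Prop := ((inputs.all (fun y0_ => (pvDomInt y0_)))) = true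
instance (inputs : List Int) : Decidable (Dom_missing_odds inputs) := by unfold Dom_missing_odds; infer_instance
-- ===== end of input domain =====

-- B replaces A's single min/max/odd-sum pass with parity fix-ups by sorting the array and
-- summing the odd numbers inside each gap between consecutive sorted elements: alternative algorithm, O(n log n).


-- ===== PORT A =====
def missing_odds (inputs : List Int) : Int :=
  match inputs with
  | [] => 0  -- Python 'inputs[0]' raises IndexError here; excluded by Pre_
  | first :: _ =>
    -- the for-loop: running minimum, maximum and sum of odd elements
    let st := inputs.foldl (fun (st : Int × Int × Int) num =>
        (if num < st.1 then num else st.1,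
         if st.2.1 < num then num else st.2.1,
         if PySem.Int.mod num 2 = 1 then st.2.2 + num else st.2.2))
      (first, first, 0)
    let minimum := st.1
    let maximum := st.2.1
    let s := st.2.2
    -- "Let interval collapse to 'both sides are odd'"
    let maximum' := if PySem.Int.mod maximum 2 = 0 then maximum + 1 else maximum
    let s1 := if PySem.Int.mod maximum 2 = 0 then s + (maximum + 1) else s
    let minimum' := if PySem.Int.mod minimum 2 = 0 then minimum - 1 else minimum
    let s2 := if PySem.Int.mod minimum 2 = 0 then s1 + (minimum - 1) else s1
    if maximum' - minimum' ≤ 2 then 0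
    else PySem.Int.floordiv (maximum' ^ 2 - minimum' ^ 2 + 2 * (minimum' + maximum')) 4 - s2

-- ===== PORT B =====
-- g(n) = ((n+1)//2)**2, the sum of odd numbers in [0, n]
def pv_g (n : Int) : Int := PySem.Int.floordiv (n + 1) 2 ^ 2

def missing_odds_alt (inputs : List Int) : Int :=
  let xs := PySem.List.sorted inputs (fun x => x) false
  -- for a, b in zip(xs, xs[1:]): total += g(b - 1) - g(a)
  (List.zip xs (PySem.List.slice xs (some 1) none)).foldl
    (fun total p => total + (pv_g (p.2 - 1) - pv_g p.1)) 0

-- ===== PRECONDITION & SPEC =====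
-- Pre_ excludes the empty list (A raises IndexError) and lists with duplicate odd values,
-- which violate the docstring's "distinct integers" precondition and on which A's running
-- odd-sum double-counts, so both answers are accidental there.
def Pre_missing_odds (inputs : List Int) : Prop :=
  inputs ≠ [] ∧ (inputs.filter (fun x => PySem.Int.mod x 2 == 1)).Nodup
instance (inputs : List Int) : Decidable (Pre_missing_odds inputs) := by
  unfold Pre_missing_odds; infer_instance
def pvWitness_missing_odds : List Int := [4, 1, 8, 5]

def Spec_missing_odds (inputs : List Int) (out : Int) : Prop := out = missing_odds_alt inputs
instance (inputs : List Int) (out : Int) : Decidable (Spec_missing_odds inputs out) := by unfold Spec_missing_odds; infer_instance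

-- ===== CLAIM (what is proved, stated in full; the proofs are below) =====
def Claim_equal_missing_odds : Prop := ∀ (inputs : List Int), Dom_missing_odds inputs → Pre_missing_odds inputs → Spec_missing_odds inputs (missing_odds inputs)
-- ===== LEMMAS AND PROOFS =====

-- A's loop computes (min, max, sum of odd elements)
lemma pv_loop_eq (l : List Int) : ∀ (a b c : Int),
    l.foldl (fun (st : Int × Int × Int) num =>
        (if num < st.1 then num else st.1,
         if st.2.1 < num then num else st.2.1,
         if PySem.Int.mod num 2 = 1 then st.2.2 + num else st.2.2)) (a, b, c)
    = (l.foldl min a, l.foldl max b,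
       c + (l.filter (fun x => PySem.Int.mod x 2 == 1)).sum) := by
  induction l with
  | nil => simp
  | cons x l ih =>
    intro a b c
    simp only [List.foldl_cons, ih]
    have h1 : (if x < a then x else a) = min a x := by rw [min_def]; split_ifs <;> omega
    have h2 : (if b < x then x else b) = max b x := by rw [max_def]; split_ifs <;> omega
    rw [h1, h2]
    by_cases hx : PySem.Int.mod x 2 = 1
    · have hb : (PySem.Int.mod x 2 == 1) = true := beq_iff_eq.mpr hx
      simp only [List.filter_cons, hb, if_pos hx, if_true, List.sum_cons]
      ring_nf
    · have hb : (PySem.Int.mod x 2 == 1) = false := by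
        simp only [beq_eq_false_iff_ne, ne_eq]; exact hx
      simp only [List.filter_cons, hb, if_neg hx, Bool.false_eq_true, if_false]

-- a Nodup list whose elements are all v and which contains v is [v]
lemma pv_nodup_single {l : List Int} {v : Int} (hnd : l.Nodup)
    (hall : ∀ x ∈ l, x = v) (hv : v ∈ l) : l = [v] := by
  cases l with
  | nil => simp at hv
  | cons x t =>
    have hx : x = v := hall x (by simp)
    have ht : t = [] := by
      cases t with
      | nil => rfl
      | cons y u =>
        have hy : y = v := hall y (by simp)
        simp [hx, hy] at hnd
    simp [hx, ht]

-- a Nodup list with elements in {u,w}, containing both, sums to u + w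
lemma pv_nodup_pair_sum {l : List Int} {u w : Int} (hnd : l.Nodup)
    (hall : ∀ x ∈ l, x = u ∨ x = w) (hu : u ∈ l) (hw : w ∈ l) (hne : u ≠ w) :
    l.sum = u + w := by
  have hfin : l.toFinset = {u, w} := by
    ext x
    simp only [List.mem_toFinset, Finset.mem_insert, Finset.mem_singleton]
    constructor
    · intro hx; exact hall x hx
    · rintro (rfl | rfl) <;> assumption
  have h := List.sum_toFinset (fun x : Int => x) hnd
  rw [hfin, Finset.sum_pair hne] at h
  simpa using h.symm

-- A's whole tail (parity fix-ups + early return + closed form) equals g(M) - g(m-1) - oddsum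
lemma pv_key (l : List Int) (m M : Int)
    (hm : m ∈ l) (hM : M ∈ l) (hlow : ∀ x ∈ l, m ≤ x) (hhigh : ∀ x ∈ l, x ≤ M)
    (hnd : (l.filter (fun x => PySem.Int.mod x 2 == 1)).Nodup) :
    (if (if PySem.Int.mod M 2 = 0 then M + 1 else M)
        - (if PySem.Int.mod m 2 = 0 then m - 1 else m) ≤ 2 then 0
     else PySem.Int.floordiv
            ((if PySem.Int.mod M 2 = 0 then M + 1 else M) ^ 2
             - (if PySem.Int.mod m 2 = 0 then m - 1 else m) ^ 2
             + 2 * ((if PySem.Int.mod m 2 = 0 then m - 1 else m)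
                    + (if PySem.Int.mod M 2 = 0 then M + 1 else M))) 4
          - (if PySem.Int.mod m 2 = 0
             then (if PySem.Int.mod M 2 = 0
                   then (l.filter (fun x => PySem.Int.mod x 2 == 1)).sum + (M + 1)
                   else (l.filter (fun x => PySem.Int.mod x 2 == 1)).sum) + (m - 1)
             else (if PySem.Int.mod M 2 = 0
                   then (l.filter (fun x => PySem.Int.mod x 2 == 1)).sum + (M + 1)
                   else (l.filter (fun x => PySem.Int.mod x 2 == 1)).sum)))
    = PySem.Int.floordiv (M + 1) 2 ^ 2 - PySem.Int.floordiv m 2 ^ 2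
      - (l.filter (fun x => PySem.Int.mod x 2 == 1)).sum := by
  have hmod2 : ∀ x : Int, PySem.Int.mod x 2 = x % 2 := fun x =>
    PySem.Int.mod_eq_emod_of_pos (by norm_num)
  have hfd2 : ∀ x : Int, PySem.Int.floordiv x 2 = x / 2 := fun x =>
    PySem.Int.floordiv_eq_ediv_of_pos (by norm_num)
  have hfd4 : ∀ x : Int, PySem.Int.floordiv x 4 = x / 4 := fun x =>
    PySem.Int.floordiv_eq_ediv_of_pos (by norm_num)
  have hmM : m ≤ M := hlow M hM
  have hodd_mem : ∀ x ∈ l.filter (fun x => PySem.Int.mod x 2 == 1),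
      m ≤ x ∧ x ≤ M ∧ x % 2 = 1 := by
    intro x hx
    rcases List.mem_filter.mp hx with ⟨hxl, hpx⟩
    refine ⟨hlow x hxl, hhigh x hxl, ?_⟩
    have := beq_iff_eq.mp hpx
    rw [hmod2] at this
    exact this
  have hmemf : ∀ x ∈ l, x % 2 = 1 → x ∈ l.filter (fun x => PySem.Int.mod x 2 == 1) := by
    intro x hxl hx1
    exact List.mem_filter.mpr ⟨hxl, beq_iff_eq.mpr (by rw [hmod2]; exact hx1)⟩
  rcases Int.even_or_odd m with ⟨a, rfl⟩ | ⟨a, rfl⟩ <;>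
    rcases Int.even_or_odd M with ⟨b, rfl⟩ | ⟨b, rfl⟩
  · -- m even, M even
    have hm0 : PySem.Int.mod (a + a) 2 = 0 := by rw [hmod2]; omega
    have hM0 : PySem.Int.mod (b + b) 2 = 0 := by rw [hmod2]; omega
    simp only [hm0, hM0, if_true]
    split_ifs with hle
    · have hsnil : l.filter (fun x => PySem.Int.mod x 2 == 1) = [] := by
        rw [List.eq_nil_iff_forall_not_mem]
        intro x hx
        rcases hodd_mem x hx with ⟨h1, h2, h3⟩
        omega
      rw [hsnil, hfd2, hfd2]
      have e1 : (b + b + 1) / 2 = b := by omega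
      have e2 : (a + a) / 2 = a := by omega
      rw [e1, e2]
      have hab : a = b := by omega
      subst hab
      simp
    · have h4 : (b + b + 1) ^ 2 - (a + a - 1) ^ 2 + 2 * (a + a - 1 + (b + b + 1))
          = 4 * (b * b + 2 * b - a * a + 2 * a) := by ring
      rw [h4, hfd4, Int.mul_ediv_cancel_left _ (by norm_num : (4 : Int) ≠ 0), hfd2, hfd2]
      have e1 : (b + b + 1) / 2 = b := by omega
      have e2 : (a + a) / 2 = a := by omega
      rw [e1, e2]
      ring
  · -- m even, M odd
    have hm0 : PySem.Int.mod (a + a) 2 = 0 := by rw [hmod2]; omega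
    have hM1 : ¬ PySem.Int.mod (2 * b + 1) 2 = 0 := by rw [hmod2]; omega
    simp only [hm0, hM1, if_true, if_false]
    split_ifs with hle
    · have hMm : 2 * b + 1 = a + a + 1 := by omega
      have hsing : l.filter (fun x => PySem.Int.mod x 2 == 1) = [2 * b + 1] := by
        apply pv_nodup_single hnd
        · intro x hx
          rcases hodd_mem x hx with ⟨h1, h2, h3⟩
          omega
        · exact hmemf _ hM (by omega)
      rw [hsing, hfd2, hfd2]
      have e1 : (2 * b + 1 + 1) / 2 = b + 1 := by omega
      have e2 : (a + a) / 2 = a := by omega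
      rw [e1, e2]
      have hab : a = b := by omega
      subst hab
      simp
      ring
    · have h4 : (2 * b + 1) ^ 2 - (a + a - 1) ^ 2 + 2 * (a + a - 1 + (2 * b + 1))
          = 4 * (b * b + 2 * b - a * a + 2 * a) := by ring
      rw [h4, hfd4, Int.mul_ediv_cancel_left _ (by norm_num : (4 : Int) ≠ 0), hfd2, hfd2]
      have e1 : (2 * b + 1 + 1) / 2 = b + 1 := by omega
      have e2 : (a + a) / 2 = a := by omega
      rw [e1, e2]
      ring
  · -- m odd, M even
    have hm1 : ¬ PySem.Int.mod (2 * a + 1) 2 = 0 := by rw [hmod2]; omega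
    have hM0 : PySem.Int.mod (b + b) 2 = 0 := by rw [hmod2]; omega
    simp only [hm1, hM0, if_true, if_false]
    split_ifs with hle
    · have hMm : b + b = 2 * a + 2 := by omega
      have hsing : l.filter (fun x => PySem.Int.mod x 2 == 1) = [2 * a + 1] := by
        apply pv_nodup_single hnd
        · intro x hx
          rcases hodd_mem x hx with ⟨h1, h2, h3⟩
          omega
        · exact hmemf _ hm (by omega)
      rw [hsing, hfd2, hfd2]
      have e1 : (b + b + 1) / 2 = a + 1 := by omega
      have e2 : (2 * a + 1) / 2 = a := by omega
      rw [e1, e2]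
      simp
      ring
    · have h4 : (b + b + 1) ^ 2 - (2 * a + 1) ^ 2 + 2 * (2 * a + 1 + (b + b + 1))
          = 4 * (b * b + 2 * b - a * a + 1) := by ring
      rw [h4, hfd4, Int.mul_ediv_cancel_left _ (by norm_num : (4 : Int) ≠ 0), hfd2, hfd2]
      have e1 : (b + b + 1) / 2 = b := by omega
      have e2 : (2 * a + 1) / 2 = a := by omega
      rw [e1, e2]
      ring
  · -- m odd, M odd
    have hm1 : ¬ PySem.Int.mod (2 * a + 1) 2 = 0 := by rw [hmod2]; omega
    have hM1 : ¬ PySem.Int.mod (2 * b + 1) 2 = 0 := by rw [hmod2]; omega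
    simp only [hm1, hM1, if_false]
    split_ifs with hle
    · rcases (by omega : b = a ∨ b = a + 1) with h | h
      · have hsing : l.filter (fun x => PySem.Int.mod x 2 == 1) = [2 * a + 1] := by
          apply pv_nodup_single hnd
          · intro x hx
            rcases hodd_mem x hx with ⟨h1, h2, h3⟩
            omega
          · exact hmemf _ hm (by omega)
        rw [hsing, hfd2, hfd2]
        have e1 : (2 * b + 1 + 1) / 2 = a + 1 := by omega
        have e2 : (2 * a + 1) / 2 = a := by omega
        rw [e1, e2]
        simp only [List.sum_cons, List.sum_nil, add_zero]
        ring
      · have hpair : (l.filter (fun x => PySem.Int.mod x 2 == 1)).sum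
            = (2 * a + 1) + (2 * b + 1) := by
          apply pv_nodup_pair_sum hnd
          · intro x hx
            rcases hodd_mem x hx with ⟨h1, h2, h3⟩
            omega
          · exact hmemf _ hm (by omega)
          · exact hmemf _ hM (by omega)
          · omega
        rw [hpair, hfd2, hfd2]
        have e1 : (2 * b + 1 + 1) / 2 = a + 2 := by omega
        have e2 : (2 * a + 1) / 2 = a := by omega
        rw [e1, e2, h]
        ring
    · have h4 : (2 * b + 1) ^ 2 - (2 * a + 1) ^ 2 + 2 * (2 * a + 1 + (2 * b + 1))
          = 4 * (b * b + 2 * b + 1 - a * a) := by ring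
      rw [h4, hfd4, Int.mul_ediv_cancel_left _ (by norm_num : (4 : Int) ≠ 0), hfd2, hfd2]
      have e1 : (2 * b + 1 + 1) / 2 = b + 1 := by omega
      have e2 : (2 * a + 1) / 2 = a := by omega
      rw [e1, e2]
      ring

-- g(b-1) = g(b) minus b when b is odd (the telescoping step of B's prefix sum)
lemma pv_g_pred (b : Int) :
    pv_g (b - 1) = pv_g b - (if PySem.Int.mod b 2 == 1 then b else 0) := by
  unfold pv_g
  rw [PySem.Int.mod_eq_emod_of_pos (by norm_num),
      PySem.Int.floordiv_eq_ediv_of_pos (by norm_num),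
      PySem.Int.floordiv_eq_ediv_of_pos (by norm_num)]
  have hb1 : b - 1 + 1 = b := by ring
  rw [hb1]
  rcases Int.even_or_odd b with ⟨k, rfl⟩ | ⟨k, rfl⟩
  · have h1 : (k + k) / 2 = k := by omega
    have h2 : (k + k + 1) / 2 = k := by omega
    have h3 : ((k + k) % 2 == 1) = false := by
      simp only [beq_eq_false_iff_ne, ne_eq]; omega
    rw [h1, h2, h3]
    simp
  · have h1 : (2 * k + 1) / 2 = k := by omega
    have h2 : (2 * k + 1 + 1) / 2 = k + 1 := by omega
    have h3 : ((2 * k + 1) % 2 == 1) = true := by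
      rw [beq_iff_eq]; omega
    rw [h1, h2, h3]
    simp
    ring

-- B's gap loop telescopes: starting from c it adds g(last) - g(head) - (sum of odds in the tail)
lemma pv_gap (t : List Int) : ∀ (a c : Int),
    (List.zip (a :: t) t).foldl (fun total p => total + (pv_g (p.2 - 1) - pv_g p.1)) c
    = c + pv_g (t.foldl (fun _ x => x) a) - pv_g a
      - (t.filter (fun x => PySem.Int.mod x 2 == 1)).sum := by
  induction t with
  | nil => intro a c; simp
  | cons b t ih =>
    intro a c
    simp only [List.zip_cons_cons, List.foldl_cons, List.filter_cons]
    rw [ih, pv_g_pred b]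
    by_cases hb : (PySem.Int.mod b 2 == 1) = true
    · simp only [hb, if_true, List.sum_cons]
      ring
    · simp only [hb, Bool.false_eq_true, if_false]
      ring

-- in a (· ≤ ·)-chain the foldl-last element is a member and an upper bound
lemma pv_last_spec (u : List Int) : ∀ m : Int, (m :: u).Pairwise (· ≤ ·) →
    u.foldl (fun _ x => x) m ∈ m :: u ∧ ∀ y ∈ m :: u, y ≤ u.foldl (fun _ x => x) m := by
  induction u with
  | nil =>
    intro m _
    refine ⟨by simp, ?_⟩
    intro y hy
    simp only [List.foldl_nil]
    simp only [List.mem_singleton] at hy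
    simp [hy]
  | cons b u ih =>
    intro m hpw
    have hmb : m ≤ b := (List.pairwise_cons.mp hpw).1 b (by simp)
    obtain ⟨hmem, hmax⟩ := ih b (List.pairwise_cons.mp hpw).2
    simp only [List.foldl_cons]
    refine ⟨?_, ?_⟩
    · rcases List.mem_cons.mp hmem with h | h
      · simp [h]
      · simp [List.mem_cons, h]
    · intro y hy
      rcases List.mem_cons.mp hy with rfl | hy'
      · exact le_trans hmb (hmax b (by simp))
      · exact hmax y hy'

-- ===== VERDICT (by name: the statement is the Claim_ definition above) =====
theorem missing_odds_spec : Claim_equal_missing_odds := by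
  intro inputs _ hpre
  obtain ⟨hne, hnd⟩ := hpre
  unfold Spec_missing_odds
  cases inputs with
  | nil => exact absurd rfl hne
  | cons h t =>
    -- name the sorted list
    obtain ⟨m, u, hxs⟩ : ∃ m u, PySem.List.sorted (h :: t) (fun x => x) false = m :: u := by
      cases hs : PySem.List.sorted (h :: t) (fun x => x) false with
      | nil => exact absurd ((PySem.List.sorted_eq_nil_iff _ _ _).mp hs) (by simp)
      | cons m u => exact ⟨m, u, rfl⟩
    have hperm : (m :: u).Perm (h :: t) := hxs ▸ PySem.List.sorted_perm (h :: t) (fun x => x) false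
    have hpw : (m :: u).Pairwise (· ≤ ·) := by
      have := PySem.List.sorted_pairwise (h :: t) (fun x => x)
      rw [hxs] at this
      exact this
    -- B's value
    have hBval : missing_odds_alt (h :: t)
        = pv_g (u.foldl (fun _ x => x) m) - pv_g m
          - (u.filter (fun x => PySem.Int.mod x 2 == 1)).sum := by
      simp only [missing_odds_alt, hxs,
        PySem.List.slice_from _ (by norm_num : (0:Int) ≤ 1)]
      simp only [Int.toNat_one, List.drop_one, List.tail_cons]
      rw [pv_gap]
      ring
    -- min/max identification
    have hm_mem : m ∈ h :: t := hperm.mem_iff.mp (by simp)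
    have hm_low : ∀ y ∈ h :: t, m ≤ y := PySem.List.key_head_sorted_le (h :: t) (fun x => x) hxs
    obtain ⟨hL_mem', hL_max'⟩ := pv_last_spec u m hpw
    have hL_mem : u.foldl (fun _ x => x) m ∈ h :: t := hperm.mem_iff.mp hL_mem'
    have hL_max : ∀ y ∈ h :: t, y ≤ u.foldl (fun _ x => x) m := fun y hy =>
      hL_max' y (hperm.mem_iff.mpr hy)
    -- the foldl min/max of A's loop coincide with B's sorted head/last
    have hmin := PySem.List.foldl_min_le t h
    have hmax := PySem.List.le_foldl_max t h
    have hmmem : t.foldl min h ∈ h :: t := by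
      rcases PySem.List.foldl_min_mem t h with h1 | h1
      · rw [h1]; simp
      · simp [h1]
    have hMmem : t.foldl max h ∈ h :: t := by
      rcases PySem.List.foldl_max_mem t h with h1 | h1
      · rw [h1]; simp
      · simp [h1]
    have hlow : ∀ x ∈ h :: t, t.foldl min h ≤ x := by
      intro x hx
      rcases List.mem_cons.mp hx with rfl | hx
      · exact hmin.1
      · exact hmin.2 x hx
    have hhigh : ∀ x ∈ h :: t, x ≤ t.foldl max h := by
      intro x hx
      rcases List.mem_cons.mp hx with rfl | hx
      · exact hmax.1
      · exact hmax.2 x hx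
    have hmeq : t.foldl min h = m :=
      le_antisymm (hlow m hm_mem) (hm_low _ hmmem)
    have hMeq : t.foldl max h = u.foldl (fun _ x => x) m :=
      le_antisymm (hL_max _ hMmem) (hhigh _ hL_mem)
    -- odd sums coincide up to the head term
    have hsum : ((h :: t).filter (fun x => PySem.Int.mod x 2 == 1)).sum
        = ((m :: u).filter (fun x => PySem.Int.mod x 2 == 1)).sum :=
      (hperm.filter _).sum_eq.symm
    -- A's value via the loop lemma and the closed form
    have hA := pv_key (h :: t) (t.foldl min h) (t.foldl max h) hmmem hMmem hlow hhigh hnd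
    simp only [missing_odds, pv_loop_eq]
    simp only [List.foldl_cons, min_self, max_self, zero_add]
    rw [hA, hBval, hmeq, hMeq, hsum]
    have hgm : PySem.Int.floordiv m 2 ^ 2 = pv_g (m - 1) := by
      unfold pv_g
      rw [(by ring : m - 1 + 1 = m)]
    rw [hgm, pv_g_pred m]
    simp only [List.filter_cons]
    by_cases hmodd : (PySem.Int.mod m 2 == 1) = true
    · simp only [hmodd, if_true, List.sum_cons]
      unfold pv_g
      ring
    · simp only [hmodd, Bool.false_eq_true, if_false]
      unfold pv_g
      ring
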